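-- pv_equiv track=rewrite | github.com/wlghsp/ProblemSolving_Everyday | 프로그래머스/Level2/2개_이하로_다른_비트/2개이하로다른비트-1.py | solution
-- ===== SOURCE A (Python) =====
-- def solution(numbers):
--     answer = []
--
--     for num in numbers:
--         if num % 2 == 0:
--             num += 1
--             answer.append(num)
--         else:
--             s = '0' + bin(num)[2:]
--             # 홀수에서는 오른쪽에서 01 을 찾아 10으로 변경하는 것이 2개 이하 변경하면서 최소 증가
--             i = s.rfind('01')
--             s = list(s)
--             s[i], s[i + 1] = '1', '0'
--             answer.append(int(''.join(s),2))
--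
--     return answer
-- ===== SOURCE B (Python) =====
-- def solution(numbers):
--     def nxt(n):
--         if n % 2 == 0:
--             return n + 1
--         # odd: adding 2^(t-1) (t = number of trailing one-bits) flips the lowest
--         # '01' bit pair to '10', the smallest increase changing at most two bits
--         return n + ((n ^ (n + 1)) + 1) // 4
--     return [nxt(n) for n in numbers]
-- ===== Notes on version B (the rewrite author's own statement) =====
-- stated objective: alternative
-- what changed: Replaces A's per-element string surgery (build bin(num), rfind('01'), flip two characters, re-parse with int(...,2)) by closed-form bit arithmetic: for odd n the flip of the lowest '01' bit pair is adding ((n^(n+1))+1)//4 = 2^(t-1) (t = trailing one-bits); Pre_ excludes lists containing a negative odd number, on which A's value is an accident of string surgery on bin()'s '-0b' sign prefix (it can even return a positive number for a negative input).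
-- outside the precondition, e.g. on solution([-3]): A returns [3], B returns [-2]; on solution([-5]): A returns [6], B returns [-3]
import Mathlib
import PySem

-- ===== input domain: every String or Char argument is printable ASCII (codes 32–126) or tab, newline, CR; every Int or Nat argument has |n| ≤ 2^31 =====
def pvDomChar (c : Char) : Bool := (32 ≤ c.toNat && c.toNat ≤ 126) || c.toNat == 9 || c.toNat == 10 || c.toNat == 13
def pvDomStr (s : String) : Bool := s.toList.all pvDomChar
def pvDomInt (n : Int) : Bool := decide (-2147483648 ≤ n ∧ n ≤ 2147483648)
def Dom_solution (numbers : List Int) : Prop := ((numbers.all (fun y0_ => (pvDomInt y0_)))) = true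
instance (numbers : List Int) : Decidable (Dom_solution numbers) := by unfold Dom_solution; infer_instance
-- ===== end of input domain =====

-- B replaces A's per-element string surgery on bin(num) by closed-form bit arithmetic
-- (an alternative, arithmetic decomposition); negative odd inputs are excluded by Pre_.

-- ===== PORT A =====
-- bin(n)[2:] for n ≥ 0: binary digits, MSB first (hand port of bin, exact; bin(0)[2:] = "0")
def binDigits (n : Nat) : List Char :=
  if n < 2 then [if n = 1 then '1' else '0']
  else binDigits (n / 2) ++ [if n % 2 = 1 then '1' else '0']
decreasing_by exact Nat.div_lt_self (by omega) (by omega)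

-- bin(num)[2:]  ('-0b11'[2:] = "b11" for negative num — exact)
def binTail (num : Int) : List Char :=
  if num < 0 then 'b' :: binDigits num.natAbs else binDigits num.toNat

-- s.rfind('01'): highest i with s[i] = '0', s[i+1] = '1', else -1 (hand port, exact for this two-char needle)
def rfind01Go : List Char → Int → Int → Int
  | c0 :: c1 :: rest, i, acc => rfind01Go (c1 :: rest) (i + 1) (if c0 = '0' ∧ c1 = '1' then i else acc)
  | _, _, acc => acc

def rfind01 (s : List Char) : Int := rfind01Go s 0 (-1)

-- int(''.join(s), 2): exact on the strings this program builds (an optional '0b' prefix followed by 0/1 digits)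
def parseBin2 (s : List Char) : Int :=
  let ds := if s.take 2 = ['0', 'b'] then s.drop 2 else s
  ds.foldl (fun acc c => 2 * acc + (if c = '1' then 1 else 0)) 0

def solution (numbers : List Int) : List Int :=
  numbers.foldl (fun answer num =>
    if PySem.Int.mod num 2 = 0 then
      answer ++ [num + 1]
    else
      let s : List Char := '0' :: binTail num
      let i := rfind01 s
      -- s[i], s[i+1] = '1', '0'  (pySetD: Python index semantics; i is in range on all admitted inputs)
      let s2 := PySem.List.pySetD (PySem.List.pySetD s i '1') (i + 1) '0'
      answer ++ [parseBin2 s2]) []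

-- ===== PORT B =====
def nxt (n : Int) : Int :=
  if PySem.Int.mod n 2 = 0 then n + 1
  else n + PySem.Int.floordiv (PySem.Int.bxor n (n + 1) + 1) 4

def solution_alt (numbers : List Int) : List Int := numbers.map nxt

-- ===== PRECONDITION & SPEC =====
-- Pre_ excludes lists containing a NEGATIVE ODD number: there A's string surgery acts on
-- bin()'s '-0b' sign prefix and its value is an accident of that representation
-- (it can even yield a positive result for a negative input); both programs agree everywhere else.
def Pre_solution (numbers : List Int) : Prop :=
  ∀ n ∈ numbers, 0 ≤ n ∨ PySem.Int.mod n 2 = 0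
instance (numbers : List Int) : Decidable (Pre_solution numbers) := by unfold Pre_solution; infer_instance

def pvWitness_solution : List Int := [0, 1, 2, 7, -4]

def Spec_solution (numbers : List Int) (out : List Int) : Prop := out = solution_alt numbers
instance (numbers : List Int) (out : List Int) : Decidable (Spec_solution numbers out) := by unfold Spec_solution; infer_instance

-- ===== CLAIM (what is proved, stated in full; the proofs are below) =====
def Claim_equal_solution : Prop := ∀ (numbers : List Int), Dom_solution numbers → Pre_solution numbers → Spec_solution numbers (solution numbers)

-- ===== LEMMAS AND PROOFS =====

-- the digit-list value function used by parseBin2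
def pv (l : List Char) : Int := l.foldl (fun acc c => 2 * acc + (if c = '1' then 1 else 0)) 0

theorem pv_shift (l : List Char) : ∀ a : Int,
    l.foldl (fun acc c => 2 * acc + (if c = '1' then 1 else 0)) a = a * 2 ^ l.length + pv l := by
  induction l with
  | nil => intro a; simp [pv]
  | cons c l ih =>
    intro a
    simp only [List.foldl_cons, List.length_cons, pv] at *
    rw [ih, ih (2 * 0 + (if c = '1' then 1 else 0))]
    ring

theorem pv_append (x y : List Char) : pv (x ++ y) = pv x * 2 ^ y.length + pv y := by
  unfold pv
  rw [List.foldl_append]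
  exact pv_shift y _

theorem pv_cons_zero (l : List Char) : pv ('0' :: l) = pv l := by
  simp [pv]

theorem pv_replicate (t : Nat) : pv (List.replicate t '1') = 2 ^ t - 1 := by
  induction t with
  | zero => simp [pv]
  | succ t ih =>
    rw [List.replicate_succ', pv_append, ih]
    simp [pv]
    ring

theorem pv_binDigits (n : Nat) : pv (binDigits n) = n := by
  induction n using Nat.strong_induction_on with
  | _ n ih =>
    rw [binDigits]
    by_cases h : n < 2
    · rw [if_pos h]
      interval_cases n <;> simp [pv]
    · rw [if_neg h, pv_append, ih (n / 2) (by omega)]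
      have h2 : n % 2 = 0 ∨ n % 2 = 1 := by omega
      rcases h2 with h2 | h2 <;> simp [pv, h2] <;> omega

theorem binDigits_ne_nil (n : Nat) : binDigits n ≠ [] := by
  rw [binDigits]
  split <;> simp

theorem binDigits_mem (n : Nat) : ∀ c ∈ binDigits n, c = '0' ∨ c = '1' := by
  induction n using Nat.strong_induction_on with
  | _ n ih =>
    rw [binDigits]
    by_cases h : n < 2
    · rw [if_pos h]
      intro c hc
      simp at hc
      subst hc
      split <;> simp
    · rw [if_neg h]
      intro c hc
      rcases List.mem_append.mp hc with h1 | h1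
      · exact ih (n / 2) (by omega) c h1
      · simp at h1
        subst h1
        split <;> simp

theorem binDigits_two_mul (q : Nat) (h : 1 ≤ q) : binDigits (2 * q) = binDigits q ++ ['0'] := by
  rw [binDigits, if_neg (by omega)]
  have h1 : 2 * q / 2 = q := by omega
  have h2 : 2 * q % 2 = 0 := by omega
  rw [h1, h2]
  simp

theorem binDigits_two_mul_add_one (q : Nat) (h : 1 ≤ q) :
    binDigits (2 * q + 1) = binDigits q ++ ['1'] := by
  rw [binDigits, if_neg (by omega)]
  have h1 : (2 * q + 1) / 2 = q := by omega
  have h2 : (2 * q + 1) % 2 = 1 := by omega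
  rw [h1, h2]
  simp

theorem binDigits_shape (t : Nat) (ht : 1 ≤ t) : ∀ q : Nat,
    binDigits (2 ^ (t + 1) * q + (2 ^ t - 1)) =
      (if q = 0 then [] else binDigits q ++ ['0']) ++ List.replicate t '1' := by
  induction t, ht using Nat.le_induction with
  | base =>
    intro q
    rcases Nat.eq_zero_or_pos q with hq | hq
    · subst hq
      norm_num
      rw [binDigits]
      simp
    · have e : 2 ^ (1 + 1) * q + (2 ^ 1 - 1) = 2 * (2 * q) + 1 := by norm_num; ring
      rw [e, binDigits_two_mul_add_one (2 * q) (by omega), binDigits_two_mul q hq,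
        if_neg (by omega)]
      simp
  | succ t ht ih =>
    intro q
    have h2t : 1 ≤ 2 ^ t := Nat.one_le_two_pow
    have e : 2 ^ (t + 1 + 1) * q + (2 ^ (t + 1) - 1)
        = 2 * (2 ^ (t + 1) * q + (2 ^ t - 1)) + 1 := by
      have e1 : (2:Nat) ^ (t + 1 + 1) * q = 2 * (2 ^ (t + 1) * q) := by ring
      have e2 : (2:Nat) ^ (t + 1) = 2 * 2 ^ t := by ring
      omega
    have hpos : 1 ≤ 2 ^ (t + 1) * q + (2 ^ t - 1) ∨ 2 ^ (t + 1) * q + (2 ^ t - 1) = 0 := by omega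
    rcases hpos with hpos | hzero
    · rw [e, binDigits_two_mul_add_one _ hpos, ih q, List.replicate_succ' (n := t)]
      simp [List.append_assoc]
    · exfalso
      have : (2:Nat) ^ t ≥ 2 := by
        calc (2:Nat) ^ t ≥ 2 ^ 1 := Nat.pow_le_pow_right (by omega) ht
        _ = 2 := by norm_num
      omega

theorem rfind01Go_no_zero (l : List Char) (h : ∀ c ∈ l, c ≠ '0') :
    ∀ i acc, rfind01Go l i acc = acc := by
  induction l with
  | nil => intro i acc; rfl
  | cons c tail ih =>
    intro i acc
    cases tail with
    | nil => rfl
    | cons d r =>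
      have hc : c ≠ '0' := h c (by simp)
      simp only [rfind01Go, if_neg (by simp [hc] : ¬(c = '0' ∧ d = '1'))]
      exact ih (fun x hx => h x (by simp [hx])) (i + 1) acc

theorem rfind01Go_block (t : Nat) (ht : 1 ≤ t) : ∀ (u : List Char) (i acc : Int),
    rfind01Go (u ++ '0' :: List.replicate t '1') i acc = i + u.length := by
  obtain ⟨t', rfl⟩ : ∃ t', t = t' + 1 := ⟨t - 1, by omega⟩
  intro u
  induction u with
  | nil =>
    intro i acc
    simp only [List.nil_append, List.replicate_succ, rfind01Go]
    rw [if_pos (by simp)]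
    rw [rfind01Go_no_zero ('1' :: List.replicate t' '1')
      (by intro c hc; rcases List.mem_cons.mp hc with h | h
          · subst h; simp
          · rw [List.eq_of_mem_replicate h]; simp)]
    simp
  | cons c u' ih =>
    intro i acc
    rcases hu : u' ++ '0' :: List.replicate (t' + 1) '1' with _ | ⟨d, r⟩
    · exact absurd hu (by simp)
    · rw [List.cons_append, hu]
      simp only [rfind01Go]
      rw [← hu, ih (i + 1) _]
      simp
      omega

theorem odd_decomp (m : Nat) (hm : m % 2 = 1) :
    ∃ q t, 1 ≤ t ∧ m = 2 ^ (t + 1) * q + (2 ^ t - 1) := by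
  obtain ⟨k, s, hs, he⟩ := Nat.exists_eq_two_pow_mul_odd (n := m + 1) (by omega)
  obtain ⟨q, hq⟩ := hs
  have h2k : 1 ≤ 2 ^ k := Nat.one_le_two_pow
  have hk : 1 ≤ k := by
    rcases Nat.eq_zero_or_pos k with h0 | h1
    · subst h0; simp at he; omega
    · exact h1
  refine ⟨q, k, hk, ?_⟩
  have h3 : m + 1 = 2 ^ (k + 1) * q + 2 ^ k := by
    rw [he, hq]; ring
  omega

theorem xor_shape (q t : Nat) :
    (2 ^ (t + 1) * q + (2 ^ t - 1)) ^^^ (2 ^ (t + 1) * q + 2 ^ t) = 2 ^ (t + 1) - 1 := by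
  have h2t : (2:Nat) ^ (t + 1) = 2 * 2 ^ t := by ring
  have h1t : 1 ≤ (2:Nat) ^ t := Nat.one_le_two_pow
  have hb1 : 2 ^ t - 1 < 2 ^ (t + 1) := by omega
  have hb2 : 2 ^ t < 2 ^ (t + 1) := by omega
  apply Nat.eq_of_testBit_eq
  intro j
  rw [Nat.testBit_xor, Nat.testBit_two_pow_mul_add q hb1 j,
    Nat.testBit_two_pow_mul_add q hb2 j, Nat.testBit_two_pow_sub_one]
  by_cases hj : j < t + 1
  · rw [if_pos hj, if_pos hj, Nat.testBit_two_pow_sub_one, Nat.testBit_two_pow]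
    by_cases hjt : j < t
    · have hne : t ≠ j := by omega
      simp [hjt, hj, hne]
    · have hteq : t = j := by omega
      simp [hteq]
  · rw [if_neg hj, if_neg hj]
    simp [hj]

-- A's odd-branch value as one expression
def oddA (num : Int) : Int :=
  parseBin2 (PySem.List.pySetD (PySem.List.pySetD ('0' :: binTail num) (rfind01 ('0' :: binTail num)) '1')
    (rfind01 ('0' :: binTail num) + 1) '0')

-- the two set operations on u ++ '0' :: replicate t '1' at index |u|
theorem flip_block (u : List Char) (t' : Nat) :
    ((u ++ '0' :: List.replicate (t' + 1) '1').set u.length '1').set (u.length + 1) '0' =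
      u ++ '1' :: '0' :: List.replicate t' '1' := by
  rw [List.set_append, if_neg (by omega)]
  simp only [Nat.sub_self, List.set_cons_zero]
  rw [List.set_append, if_neg (by omega)]
  have h1 : u.length + 1 - u.length = 1 := by omega
  rw [h1]
  simp [List.replicate_succ]

theorem parseBin2_noprefix (s : List Char) (h : s.take 2 ≠ ['0', 'b']) : parseBin2 s = pv s := by
  simp [parseBin2, pv, h]

theorem pv_final (pref : List Char) (q t' : Nat) (h : pv pref = q) :
    pv (pref ++ '1' :: '0' :: List.replicate t' '1')
      = q * 2 ^ (t' + 2) + 2 * 2 ^ t' + (2 ^ t' - 1) := by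
  have e : '1' :: '0' :: List.replicate t' '1' = ['1', '0'] ++ List.replicate t' '1' := rfl
  rw [e, pv_append, pv_append, h]
  have h10 : pv ['1', '0'] = 2 := by simp [pv]
  rw [h10, pv_replicate]
  simp [List.length_replicate]
  ring

theorem nxt_val (n : Int) (q t' : Nat) (hn : ¬ PySem.Int.mod n 2 = 0) (hpos : 0 ≤ n)
    (hdec : n.natAbs = 2 ^ (t' + 2) * q + (2 ^ (t' + 1) - 1)) :
    nxt n = (n.natAbs : Int) + 2 ^ t' := by
  have hcast : n = (n.natAbs : Int) := by omega
  simp only [nxt]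
  rw [if_neg hn]
  conv_lhs => rw [hcast]
  congr 1
  have hc : ((n.natAbs : Int) + 1) = ((n.natAbs + 1 : Nat) : Int) := by push_cast; ring
  rw [hc, PySem.Int.bxor_natCast]
  have hx : n.natAbs ^^^ (n.natAbs + 1) = 2 ^ (t' + 2) - 1 := by
    have hsum : n.natAbs + 1 = 2 ^ (t' + 2) * q + 2 ^ (t' + 1) := by
      have := Nat.one_le_two_pow (n := t' + 1); omega
    rw [hsum, hdec]
    exact xor_shape q (t' + 1)
  rw [hx]
  have h1 : ((2 ^ (t' + 2) - 1 : Nat) : Int) + 1 = ((2 ^ (t' + 2) : Nat) : Int) := by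
    rw [Nat.cast_sub Nat.one_le_two_pow]; ring
  rw [h1]
  have h4 : (4 : Int) = ((4 : Nat) : Int) := by norm_num
  rw [h4, PySem.Int.floordiv_natCast]
  have hdiv : 2 ^ (t' + 2) / 4 = 2 ^ t' := by
    have e : (2 : Nat) ^ (t' + 2) = 2 ^ t' * 4 := by ring
    omega
  rw [hdiv]
  push_cast
  ring

theorem oddA_block (u : List Char) (t' : Nat) :
    PySem.List.pySetD (PySem.List.pySetD (u ++ '0' :: List.replicate (t' + 1) '1')
        (rfind01 (u ++ '0' :: List.replicate (t' + 1) '1')) '1')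
      (rfind01 (u ++ '0' :: List.replicate (t' + 1) '1') + 1) '0'
    = u ++ '1' :: '0' :: List.replicate t' '1' := by
  have hi : rfind01 (u ++ '0' :: List.replicate (t' + 1) '1') = (u.length : Int) := by
    rw [rfind01, rfind01Go_block (t' + 1) (by omega)]
    simp
  rw [hi, PySem.List.pySetD_natCast]
  have h1 : (u.length : Int) + 1 = ((u.length + 1 : Nat) : Int) := by push_cast; ring
  rw [h1, PySem.List.pySetD_natCast]
  exact flip_block u t'

theorem odd_elem (n : Int) (hn : ¬ PySem.Int.mod n 2 = 0) (hpos : 0 ≤ n) : oddA n = nxt n := by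
  have hdvd : ¬ (2 : Int) ∣ n := fun h => hn ((PySem.Int.mod_eq_zero_iff_dvd n 2).mpr h)
  have hmodd : n.natAbs % 2 = 1 := by omega
  obtain ⟨q, t, ht, hdec⟩ := odd_decomp n.natAbs hmodd
  obtain ⟨t', rfl⟩ : ∃ t', t = t' + 1 := ⟨t - 1, by omega⟩
  have hdec' : n.natAbs = 2 ^ (t' + 2) * q + (2 ^ (t' + 1) - 1) := hdec
  have h1t : 1 ≤ (2 : Nat) ^ (t' + 1) := Nat.one_le_two_pow
  have hshape := binDigits_shape (t' + 1) (by omega) q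
  have hcastAbs : (n.natAbs : Int) = 2 ^ (t' + 2) * q + (2 ^ (t' + 1) - 1 : Int) := by
    rw [hdec']
    push_cast [Nat.cast_sub h1t]
    ring
  have htn : n.toNat = n.natAbs := by omega
  have hbt : binTail n = binDigits n.natAbs := by
    rw [binTail, if_neg (by omega), htn]
  have hB : nxt n = (n.natAbs : Int) + 2 ^ t' := nxt_val n q t' hn hpos hdec'
  rcases Nat.eq_zero_or_pos q with hq | hq
  · -- q = 0
    subst hq
    have hm0 : n.natAbs = 2 ^ (t' + 1) - 1 := by omega
    have hshape0 : binDigits (2 ^ (t' + 1) - 1) = List.replicate (t' + 1) '1' := by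
      have h := binDigits_shape (t' + 1) (by omega) 0
      norm_num at h
      exact h
    have hu : ('0' : Char) :: binDigits n.natAbs
        = [] ++ '0' :: List.replicate (t' + 1) '1' := by
      rw [hm0, hshape0]
      simp
    unfold oddA
    rw [hbt, hu, oddA_block, List.nil_append]
    rw [parseBin2_noprefix _ (by simp)]
    have hpv := pv_final [] 0 t' (by simp [pv])
    simp only [List.nil_append] at hpv
    rw [hpv, hB, hcastAbs]
    ring
  · -- q ≥ 1
    rw [if_neg (by omega)] at hshape
    have hu : ('0' : Char) :: binDigits n.natAbs
        = ('0' :: binDigits q) ++ '0' :: List.replicate (t' + 1) '1' := by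
      rw [hdec', hshape]
      simp [List.append_assoc]
    unfold oddA
    rw [hbt, hu, oddA_block]
    obtain ⟨c, cs, hc⟩ := List.exists_cons_of_ne_nil (binDigits_ne_nil q)
    have hcmem : c = '0' ∨ c = '1' := binDigits_mem q c (by rw [hc]; simp)
    rw [parseBin2_noprefix _ (by
      rw [List.cons_append, hc]
      rcases hcmem with h | h <;> subst h <;> simp)]
    rw [List.cons_append, pv_cons_zero, pv_final (binDigits q) q t' (pv_binDigits q)]
    rw [hB, hcastAbs]
    ring

theorem fold_acc (numbers : List Int) (hpre : ∀ n ∈ numbers, 0 ≤ n ∨ PySem.Int.mod n 2 = 0) :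
    ∀ acc : List Int,
    numbers.foldl (fun answer num =>
      if PySem.Int.mod num 2 = 0 then
        answer ++ [num + 1]
      else
        let s : List Char := '0' :: binTail num
        let i := rfind01 s
        let s2 := PySem.List.pySetD (PySem.List.pySetD s i '1') (i + 1) '0'
        answer ++ [parseBin2 s2]) acc = acc ++ numbers.map nxt := by
  induction numbers with
  | nil => intro acc; simp
  | cons n ns ih =>
    intro acc
    have hns : ∀ m ∈ ns, 0 ≤ m ∨ PySem.Int.mod m 2 = 0 := fun m hm => hpre m (by simp [hm])
    simp only [List.foldl_cons, List.map_cons]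
    by_cases h : PySem.Int.mod n 2 = 0
    · rw [if_pos h, ih hns]
      have hb : nxt n = n + 1 := by rw [nxt, if_pos h]
      rw [hb]
      simp
    · rw [if_neg h]
      have hpos : 0 ≤ n := (hpre n (by simp)).resolve_right h
      show List.foldl _ (acc ++ [oddA n]) ns = acc ++ nxt n :: ns.map nxt
      rw [ih hns, odd_elem n h hpos]
      simp

-- ===== VERDICT (by name: the statement is the Claim_ definition above) =====
theorem solution_spec : Claim_equal_solution := by
  intro numbers _ hpre
  unfold Spec_solution solution solution_alt
  simpa using fold_acc numbers hpre []
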